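-- pv_equiv track=rewrite | github.com/rysavy-ondrej/AutoFedProfile | lib/viz_helper.py | get_padding_and_dim
-- ===== SOURCE A (Python) =====
-- import math
--
-- def is_composite(x):
--     """Return True if x is composite (not prime) and x >= 4; otherwise False."""
--     if x < 4:
--         return False  # 2 and 3 are prime; 1 is neither prime nor composite
--     for i in range(2, int(math.sqrt(x)) + 1):
--         if x % i == 0:
--             return True
--     return False
--
-- def find_nearest_composites(n):
--     """Return the composite numbers greater than n."""
--     candidates = []
--     for i in range(n, int(n * 3 / 2)):
--         if is_composite(i):
--             candidates.append(i)
--     return candidates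
--
-- def greatest_divisor_pair(x):
--     """
--     Return the pair of divisors (d, x//d) for composite x such that
--     d is the greatest divisor not exceeding sqrt(x). This pair is closest to each other.
--     """
--     d = int(math.sqrt(x))
--     while d > 1:
--         if x % d == 0:
--             return (d, x // d)
--         d -= 1
--     return (1, x)
--
-- def get_padding_and_dim(x):
--     """
--     Determine the nearest composite number ≥ x and compute its
--     optimal 2D reshape dimensions (d1, d2) with minimal difference
--     between sides. Returns (new_length, dim_x, dim_y), where:
--         new_length - padded length
--         dim_x, dim_y - target image dimensions
--     """
--     dif = x
--     val_x = x
--     val_d1 = 0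
--     val_d2 = 0
--     for nearest in find_nearest_composites(x):
--         d1, d2 = greatest_divisor_pair(nearest)
--         if (math.fabs(d1-d2) > dif):
--             return (val_x, val_d1, val_d2)
--         else:
--             val_x = nearest
--             val_d1 = d1
--             val_d2 = d2
--             dif = math.fabs(d1-d2)
-- ===== SOURCE B (Python) =====
-- def get_padding_and_dim(x):
--     """Sieve-based rewrite: one pass over divisors d marks every multiple in
--     [lo, limit) with its largest divisor d <= sqrt, instead of per-number
--     trial division; then a single walk applies the acceptance rule."""
--     limit = int(x * 3 / 2)
--     lo = x if x > 4 else 4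
--     if limit <= lo:
--         return None
--     best = [0] * (limit - lo)
--     d = 2
--     while d * d < limit:
--         start = d * d
--         first = ((lo + d - 1) // d) * d
--         if first > start:
--             start = first
--         for m in range(start, limit, d):
--             best[m - lo] = d
--         d += 1
--     dif = x
--     cur = (x, 0, 0)
--     for m in range(lo, limit):
--         d1 = best[m - lo]
--         if d1 == 0:
--             continue
--         d2 = m // d1
--         if d2 - d1 > dif:
--             return cur
--         cur = (m, d1, d2)
--         dif = d2 - d1
--     return None
-- ===== Notes on version B (the rewrite author's own statement) =====
-- stated objective: faster
-- what changed: A trial-divides every number in [x, 3x/2) twice (upward scan for compositeness, downward scan for the balanced divisor); B builds the largest divisor d <= sqrt(m) for every m in the range at once with a divisor sieve (for each d, mark its multiples from max(d*d, first multiple >= lo)) and then does a single walk applying A's acceptance rule.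
import Mathlib
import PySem

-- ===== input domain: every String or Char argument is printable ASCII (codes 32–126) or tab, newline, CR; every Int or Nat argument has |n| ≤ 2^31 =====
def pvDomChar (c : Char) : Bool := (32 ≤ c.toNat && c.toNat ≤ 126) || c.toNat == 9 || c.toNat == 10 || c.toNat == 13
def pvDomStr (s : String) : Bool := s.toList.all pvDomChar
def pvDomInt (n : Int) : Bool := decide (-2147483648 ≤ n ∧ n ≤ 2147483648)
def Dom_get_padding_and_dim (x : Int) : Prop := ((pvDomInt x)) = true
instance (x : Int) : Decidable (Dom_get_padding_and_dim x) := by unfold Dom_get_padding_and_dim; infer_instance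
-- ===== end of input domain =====

-- B replaces A's per-number trial division (is_composite + greatest_divisor_pair) with one
-- divisor sieve over [lo, limit) plus a single walk; objective: faster (measured).
-- Python floats: A's 'int(math.sqrt(x))' is ported as pvIsqrt (exact integer sqrt for the
-- 0 ≤ x ≤ 3·2^31 values it is applied to) and 'int(x*3/2)' as PySem.Int.truncdiv (x*3) 2
-- (exact for |x| ≤ 2^31); math.fabs(d1-d2) on ints of this size is |d1-d2|, exactly.

-- ===== PORT A =====

-- int(math.sqrt(x)), exact on the values A applies it to
def pvIsqrt (x : Int) : Int := (Nat.sqrt x.toNat : Int)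

def is_composite (x : Int) : Bool :=
  if x < 4 then false
  else (PySem.List.pyRange 2 (pvIsqrt x + 1) 1).any (fun i => PySem.Int.mod x i == 0)

def find_nearest_composites (n : Int) : List Int :=
  (PySem.List.pyRange n (PySem.Int.truncdiv (n * 3) 2) 1).filter is_composite

-- the 'while d > 1' countdown, structurally on d (d = int(math.sqrt(x)) ≥ 0, so the Nat
-- counter carries exactly Python's d)
def gdpLoop (x : Int) : Nat → Int × Int
  | 0 => (1, x)
  | Nat.succ n =>
      let d : Int := (Nat.succ n : Nat)
      if 1 < d then
        if PySem.Int.mod x d == 0 then (d, PySem.Int.floordiv x d)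
        else gdpLoop x n
      else (1, x)

def greatest_divisor_pair (x : Int) : Int × Int := gdpLoop x (pvIsqrt x).toNat

def gpLoop : List Int → Int → Int → Int → Int → Option (Int × Int × Int)
  | [], _, _, _, _ => none
  | nearest :: rest, dif, vx, v1, v2 =>
      let p := greatest_divisor_pair nearest
      if |p.1 - p.2| > dif then some (vx, v1, v2)
      else gpLoop rest |p.1 - p.2| nearest p.1 p.2

def get_padding_and_dim (x : Int) : Option (Int × Int × Int) :=
  gpLoop (find_nearest_composites x) x x 0 0

-- ===== PORT B =====

-- the 'while d * d < limit' loop; the Nat fuel (limit - d).toNat only bounds the number of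
-- iterations (d grows by 1 per step and stops before limit), it never changes a step
def sieveLoop (limit lo : Int) (best : List Int) (d : Int) : Nat → List Int
  | 0 => best
  | Nat.succ fuel =>
      if d * d < limit then
        let first := PySem.Int.floordiv (lo + d - 1) d * d
        let start := if first > d * d then first else d * d
        sieveLoop limit lo
          ((PySem.List.pyRange start limit d).foldl
            (fun b m => PySem.List.pySetD b (m - lo) d) best) (d + 1) fuel
      else best

def walkLoop (lo : Int) (best : List Int) :
    List Int → Int → (Int × Int × Int) → Option (Int × Int × Int)
  | [], _, _ => none
  | m :: rest, dif, cur =>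
      let d1 := PySem.List.pyGetD best (m - lo) 0
      if d1 == 0 then walkLoop lo best rest dif cur
      else
        let d2 := PySem.Int.floordiv m d1
        if d2 - d1 > dif then some cur
        else walkLoop lo best rest (d2 - d1) (m, d1, d2)

def get_padding_and_dim_alt (x : Int) : Option (Int × Int × Int) :=
  let limit := PySem.Int.truncdiv (x * 3) 2
  let lo := if x > 4 then x else 4
  if limit ≤ lo then none
  else
    let best := sieveLoop limit lo (List.replicate (limit - lo).toNat 0) 2 (limit - 2).toNat
    walkLoop lo best (PySem.List.pyRange lo limit 1) x (x, 0, 0)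

-- ===== PRECONDITION & SPEC =====
def Spec_get_padding_and_dim (x : Int) (out : Option (Int × Int × Int)) : Prop := out = get_padding_and_dim_alt x
instance (x : Int) (out : Option (Int × Int × Int)) : Decidable (Spec_get_padding_and_dim x out) := by unfold Spec_get_padding_and_dim; infer_instance

-- ===== CLAIM (what is proved, stated in full; the proofs are below) =====
def Claim_equal_get_padding_and_dim : Prop := ∀ (x : Int), Dom_get_padding_and_dim x → Spec_get_padding_and_dim x (get_padding_and_dim x)

-- ===== LEMMAS AND PROOFS =====

-- the last d in [2, D] with d ∣ m and d*d ≤ m (0 if none): common reference for both ports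
def refAux (m D : Int) : Int :=
  (PySem.List.pyRange 2 (D + 1) 1).foldl
    (fun a e => if PySem.Int.mod m e = 0 ∧ e * e ≤ m then e else a) 0

lemma refAux_le_one (m D : Int) (h : D ≤ 1) : refAux m D = 0 := by
  unfold refAux
  rw [PySem.List.pyRange_one_eq_nil (by omega)]
  rfl

lemma refAux_succ (m D : Int) (h : 2 ≤ D) :
    refAux m D = if PySem.Int.mod m D = 0 ∧ D * D ≤ m then D else refAux m (D - 1) := by
  unfold refAux
  rw [show D + 1 = (D - 1 + 1) + 1 by ring, PySem.List.pyRange_one_succ_right (by omega),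
    List.foldl_append]
  simp only [List.foldl_cons, List.foldl_nil, sub_add_cancel]

lemma pvIsqrt_sq_le (m e : Int) (hm : 0 ≤ m) (he : 0 ≤ e) (h : e ≤ pvIsqrt m) : e * e ≤ m := by
  unfold pvIsqrt at h
  have h1 : ((Nat.sqrt m.toNat * Nat.sqrt m.toNat : Nat) : Int) ≤ ((m.toNat : Nat) : Int) := by
    exact_mod_cast Nat.sqrt_le m.toNat
  push_cast at h1
  have hm2 : (m.toNat : Int) = m := Int.toNat_of_nonneg hm
  nlinarith [h, he, h1]

lemma pvIsqrt_lt_sq (m e : Int) (hm : 0 ≤ m) (h : pvIsqrt m < e) : m < e * e := by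
  unfold pvIsqrt at h
  have h2 : Nat.sqrt m.toNat < e.toNat := by omega
  have h4 : m.toNat < e.toNat * e.toNat :=
    lt_of_lt_of_le (Nat.lt_succ_sqrt m.toNat) (Nat.mul_le_mul (by omega) (by omega))
  have h5 : ((m.toNat : Nat) : Int) < ((e.toNat * e.toNat : Nat) : Int) := by exact_mod_cast h4
  push_cast at h5
  have hm2 : (m.toNat : Int) = m := Int.toNat_of_nonneg hm
  have he1 : (e.toNat : Int) = e := by omega
  rw [hm2, he1] at h5
  exact h5

lemma refAux_stable (m D : Int) (hm : 0 ≤ m) (h : pvIsqrt m ≤ D) :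
    refAux m D = refAux m (pvIsqrt m) := by
  have hs : 0 ≤ pvIsqrt m := by unfold pvIsqrt; positivity
  obtain ⟨n, hn⟩ : ∃ n : Nat, (D - pvIsqrt m).toNat = n := ⟨_, rfl⟩
  induction n generalizing D with
  | zero => have : D = pvIsqrt m := by omega
            rw [this]
  | succ n ih =>
    have hD : pvIsqrt m < D := by omega
    by_cases h2 : 2 ≤ D
    · rw [refAux_succ m D h2]
      have : ¬ (D * D ≤ m) := by have := pvIsqrt_lt_sq m D hm hD; omega
      rw [if_neg (by tauto)]
      exact ih (D - 1) (by omega) (by omega)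
    · have h1 : D = 1 := by omega
      have h0 : pvIsqrt m = 0 := by omega
      rw [h1, h0, refAux_le_one m 1 (by omega), refAux_le_one m 0 (by omega)]

lemma refAux_pos_spec (m : Int) (n : Nat) :
    refAux m (n : Int) = 0 ∨
      (2 ≤ refAux m (n : Int) ∧ PySem.Int.mod m (refAux m (n : Int)) = 0 ∧
        refAux m (n : Int) * refAux m (n : Int) ≤ m) := by
  induction n with
  | zero => left; exact refAux_le_one m 0 (by omega)
  | succ n ih =>
    by_cases h2 : 2 ≤ ((n + 1 : Nat) : Int)
    · rw [refAux_succ m _ h2]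
      split_ifs with hc
      · right; exact ⟨h2, hc.1, hc.2⟩
      · have : ((n + 1 : Nat) : Int) - 1 = (n : Int) := by push_cast; ring
        rw [this]; exact ih
    · left; exact refAux_le_one m _ (by omega)

lemma refAux_ne_zero_iff (m : Int) (n : Nat) :
    refAux m (n : Int) ≠ 0 ↔
      ∃ e : Int, 2 ≤ e ∧ e ≤ (n : Int) ∧ e * e ≤ m ∧ PySem.Int.mod m e = 0 := by
  induction n with
  | zero =>
    rw [refAux_le_one m _ (by norm_num)]
    constructor
    · intro h; exact absurd rfl h
    · rintro ⟨e, h1, h2, -, -⟩; omega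
  | succ n ih =>
    by_cases h2 : 2 ≤ ((n + 1 : Nat) : Int)
    · rw [refAux_succ m _ h2]
      have hcast : ((n + 1 : Nat) : Int) - 1 = (n : Int) := by push_cast; ring
      split_ifs with hc
      · constructor
        · intro _; exact ⟨_, h2, le_refl _, hc.2, hc.1⟩
        · intro _; omega
      · rw [hcast, ih]
        constructor
        · rintro ⟨e, he1, he2, he3, he4⟩; exact ⟨e, he1, by push_cast; omega, he3, he4⟩
        · rintro ⟨e, he1, he2, he3, he4⟩
          refine ⟨e, he1, ?_, he3, he4⟩
          rcases eq_or_lt_of_le he2 with heq | hlt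
          · exfalso; rw [heq] at he4 he3; exact hc ⟨he4, he3⟩
          · omega
    · rw [refAux_le_one m _ (by omega)]
      constructor
      · intro h; exact absurd rfl h
      · rintro ⟨e, he1, he2, -, -⟩; omega

lemma gdp_eq (m : Int) (hm : 0 ≤ m) (n : Nat) (hn : (n : Int) ≤ pvIsqrt m) :
    gdpLoop m n =
      (if refAux m (n : Int) = 0 then (1, m)
       else (refAux m (n : Int), PySem.Int.floordiv m (refAux m (n : Int)))) := by
  induction n with
  | zero =>
    rw [refAux_le_one m _ (by norm_num)]
    norm_num [gdpLoop]
  | succ n ih =>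
    have hstep : gdpLoop m (n + 1) =
        (if 1 < ((n + 1 : Nat) : Int) then
          (if PySem.Int.mod m ((n + 1 : Nat) : Int) == 0
           then (((n + 1 : Nat) : Int), PySem.Int.floordiv m ((n + 1 : Nat) : Int))
           else gdpLoop m n)
         else (1, m)) := rfl
    by_cases h2 : 2 ≤ ((n + 1 : Nat) : Int)
    · rw [hstep]
      rw [if_pos (show (1:Int) < ((n + 1 : Nat) : Int) by omega)]
      have hsq : ((n + 1 : Nat) : Int) * ((n + 1 : Nat) : Int) ≤ m :=
        pvIsqrt_sq_le m _ hm (by positivity) hn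
      have hcast : ((n + 1 : Nat) : Int) - 1 = (n : Int) := by push_cast; ring
      by_cases hmod : PySem.Int.mod m ((n + 1 : Nat) : Int) = 0
      · have hbeq : (PySem.Int.mod m ((n + 1 : Nat) : Int) == 0) = true := by simpa using hmod
        have hr : refAux m ((n + 1 : Nat) : Int) = ((n + 1 : Nat) : Int) := by
          rw [refAux_succ m _ h2, if_pos (And.intro hmod hsq)]
        rw [if_pos hbeq, hr, if_neg (show ¬ ((n + 1 : Nat) : Int) = 0 by omega)]
      · have hbeq : ¬ ((PySem.Int.mod m ((n + 1 : Nat) : Int) == 0) = true) := by simpa using hmod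
        have hr : refAux m ((n + 1 : Nat) : Int) = refAux m (n : Int) := by
          rw [refAux_succ m _ h2, if_neg (fun hc => hmod hc.1), hcast]
        rw [if_neg hbeq, hr]
        exact ih (by omega)
    · have h1 : ((n + 1 : Nat) : Int) = 1 := by omega
      have hn0 : n = 0 := by omega
      subst hn0
      rw [hstep, if_neg (by omega), h1, refAux_le_one m 1 (by omega)]
      norm_num

lemma is_composite_eq (m : Int) (hm : 4 ≤ m) :
    is_composite m = (refAux m (pvIsqrt m) != 0) := by
  have hs : 0 ≤ pvIsqrt m := by unfold pvIsqrt; positivity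
  obtain ⟨n, hn⟩ : ∃ n : Nat, (n : Int) = pvIsqrt m := ⟨(pvIsqrt m).toNat, by omega⟩
  unfold is_composite
  rw [if_neg (by omega), ← hn]
  by_cases hany : ((PySem.List.pyRange 2 ((n : Int) + 1) 1).any
      (fun i => PySem.Int.mod m i == 0)) = true
  · rw [hany]
    obtain ⟨i, hi, hmod⟩ := List.any_eq_true.mp hany
    have hi' := (PySem.List.mem_pyRange_one).mp hi
    have hne : refAux m (n : Int) ≠ 0 := by
      rw [refAux_ne_zero_iff m n]
      refine ⟨i, by omega, by omega, ?_, by simpa using hmod⟩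
      exact pvIsqrt_sq_le m i (by omega) (by omega) (by omega)
    simp [hne]
  · have hany' := Bool.not_eq_true _ ▸ hany
    rw [Bool.not_eq_true] at hany
    rw [hany]
    have hno := List.any_eq_false.mp hany
    have hz : refAux m (n : Int) = 0 := by
      by_contra hne
      obtain ⟨e, he1, he2, he3, he4⟩ := (refAux_ne_zero_iff m n).mp hne
      have := hno e (by rw [PySem.List.mem_pyRange_one]; omega)
      simp [he4] at this
    simp [hz]

lemma get_set (l : List Int) (i j v : Int) (hi : 0 ≤ i)
    (hj : 0 ≤ j) (hjl : j < (l.length : Int)) :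
    PySem.List.pyGetD (PySem.List.pySetD l i v) j 0 =
      if j = i then v else PySem.List.pyGetD l j 0 := by
  rw [PySem.List.pySetD_of_nonneg l v hi]
  rw [PySem.List.pyGetD_eq_getElem _ 0 hj (by simpa using hjl),
      PySem.List.pyGetD_eq_getElem _ 0 hj hjl]
  rw [List.getElem_set]
  split_ifs with h1 h2 h3
  · rfl
  · exact absurd (by omega : j = i) h2
  · exact absurd (by omega : i.toNat = j.toNat) h1
  · rfl

lemma inner_len (d lo : Int) (ms : List Int) (best : List Int) :
    (ms.foldl (fun b m => PySem.List.pySetD b (m - lo) d) best).length = best.length := by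
  induction ms generalizing best with
  | nil => rfl
  | cons m ms ih => rw [List.foldl_cons, ih, PySem.List.length_pySetD]

lemma inner_char (d lo limit : Int) (best : List Int)
    (hlen : best.length = (limit - lo).toNat) (m' : Int) (h1 : lo ≤ m') (h2 : m' < limit)
    (ms : List Int) (hms : ∀ m ∈ ms, lo ≤ m ∧ m < limit) :
    PySem.List.pyGetD (ms.foldl (fun b m => PySem.List.pySetD b (m - lo) d) best) (m' - lo) 0
      = if m' ∈ ms then d else PySem.List.pyGetD best (m' - lo) 0 := by
  induction ms generalizing best with
  | nil => simp
  | cons m ms ih =>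
    obtain ⟨hm1, hm2⟩ := hms m (by simp)
    rw [List.foldl_cons, ih _ (by rw [PySem.List.length_pySetD]; exact hlen)
      (fun a ha => hms a (by simp [ha]))]
    have hset := get_set best (m - lo) (m' - lo) d (by omega) (by omega) (by omega)
    by_cases hmem : m' ∈ ms
    · simp [hmem]
    · rw [if_neg hmem, hset]
      by_cases heq : m' = m
      · rw [if_pos (by omega : m' - lo = m - lo), if_pos (by simp [heq])]
      · rw [if_neg (by omega : ¬ (m' - lo = m - lo)), if_neg (by simp [heq, hmem])]

lemma mem_sieve_range (d lo limit m' : Int) (hd : 2 ≤ d) (h1 : lo ≤ m') (h2 : m' < limit) :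
    (m' ∈ PySem.List.pyRange
        (if PySem.Int.floordiv (lo + d - 1) d * d > d * d
         then PySem.Int.floordiv (lo + d - 1) d * d else d * d) limit d)
      ↔ (PySem.Int.mod m' d = 0 ∧ d * d ≤ m') := by
  have hdp : (0:Int) < d := by omega
  set q := PySem.Int.floordiv (lo + d - 1) d with hq
  have hqb : q * d ≤ lo + d - 1 ∧ lo + d - 1 < (q + 1) * d :=
    (PySem.Int.floordiv_eq_iff_of_pos hdp).mp rfl
  have hql : lo ≤ q * d := by nlinarith [hqb.2]
  set start := if q * d > d * d then q * d else d * d with hs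
  have hdvds : d ∣ start := by
    rw [hs]; split_ifs
    · exact dvd_mul_left d q
    · exact dvd_mul_right d d
  have hds : d * d ≤ start := by
    by_cases h : q * d > d * d
    · simp [hs, h]; omega
    · simp [hs, h]
  rw [PySem.List.mem_pyRange_iff_of_pos hdp m']
  rw [PySem.Int.mod_eq_zero_iff_dvd]
  constructor
  · rintro ⟨ha, hb, hc⟩
    have hdm : d ∣ m' := by
      have := dvd_add hc hdvds
      simpa using this
    exact ⟨hdm, by omega⟩
  · rintro ⟨hdm, hsq⟩
    refine ⟨?_, h2, (dvd_sub hdm hdvds)⟩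
    obtain ⟨k, hk⟩ := hdm
    have hqk : q ≤ k := by
      have h6 : (q - 1) * d < k * d := by nlinarith [hqb.1, hk, h1]
      have := lt_of_mul_lt_mul_right h6 (le_of_lt hdp)
      omega
    have hqdm : q * d ≤ m' := by
      calc q * d ≤ k * d := by nlinarith
      _ = m' := by rw [hk]; ring
    by_cases h : q * d > d * d <;> simp [hs, h] <;> omega

lemma sieve_char (limit lo : Int) (hlo : 0 ≤ lo) :
    ∀ (n : Nat) (d : Int) (best : List Int), (limit - d).toNat = n → 2 ≤ d →
      best.length = (limit - lo).toNat →
      (∀ m', lo ≤ m' → m' < limit → PySem.List.pyGetD best (m' - lo) 0 = refAux m' (d - 1)) →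
      ∀ m', lo ≤ m' → m' < limit →
        PySem.List.pyGetD (sieveLoop limit lo best d n) (m' - lo) 0 = refAux m' (pvIsqrt m') := by
  intro n
  induction n with
  | zero =>
    intro d best hn hd hlen hinv m' h1 h2
    have hld : limit ≤ d := by omega
    have hdd : d ≤ d * d := by nlinarith [sq_nonneg (2 * d - 1)]
    have hsm : pvIsqrt m' ≤ d - 1 := by
      by_contra hcon
      have hdle : d ≤ pvIsqrt m' := by omega
      have := pvIsqrt_sq_le m' d (by omega) (by omega) hdle
      omega
    show PySem.List.pyGetD best (m' - lo) 0 = refAux m' (pvIsqrt m')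
    rw [hinv m' h1 h2, refAux_stable m' (d - 1) (by omega) hsm]
  | succ fuel ih =>
    intro d best hn hd hlen hinv m' h1 h2
    have hstep : sieveLoop limit lo best d (fuel + 1) =
        (if d * d < limit then
          sieveLoop limit lo
            ((PySem.List.pyRange
                (if PySem.Int.floordiv (lo + d - 1) d * d > d * d
                 then PySem.Int.floordiv (lo + d - 1) d * d else d * d) limit d).foldl
              (fun b m => PySem.List.pySetD b (m - lo) d) best) (d + 1) fuel
         else best) := rfl
    rw [hstep]
    by_cases hlt : d * d < limit
    · rw [if_pos hlt]
      have hdd : d ≤ d * d := by nlinarith [sq_nonneg (2 * d - 1)]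
      have hqb : PySem.Int.floordiv (lo + d - 1) d * d ≤ lo + d - 1 ∧
          lo + d - 1 < (PySem.Int.floordiv (lo + d - 1) d + 1) * d :=
        (PySem.Int.floordiv_eq_iff_of_pos (by omega : (0:Int) < d)).mp rfl
      have hql : lo ≤ PySem.Int.floordiv (lo + d - 1) d * d := by nlinarith [hqb.2]
      have hstq : lo ≤ (if PySem.Int.floordiv (lo + d - 1) d * d > d * d
          then PySem.Int.floordiv (lo + d - 1) d * d else d * d) := by
        split_ifs with h <;> omega
      have hnew : ∀ m'', lo ≤ m'' → m'' < limit →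
          PySem.List.pyGetD ((PySem.List.pyRange
              (if PySem.Int.floordiv (lo + d - 1) d * d > d * d
               then PySem.Int.floordiv (lo + d - 1) d * d else d * d) limit d).foldl
            (fun b m => PySem.List.pySetD b (m - lo) d) best) (m'' - lo) 0
            = refAux m'' ((d + 1) - 1) := by
        intro m'' hg1 hg2
        rw [inner_char d lo limit best hlen m'' hg1 hg2 _
          (fun a ha => by
            have hmem := (PySem.List.mem_pyRange_iff_of_pos (by omega : (0:Int) < d) a).mp ha
            exact ⟨by omega, hmem.2.1⟩)]
        simp only [mem_sieve_range d lo limit m'' hd hg1 hg2]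
        have h11 : (d + 1) - 1 = d := by ring
        rw [h11, refAux_succ m'' d hd]
        by_cases hc : PySem.Int.mod m'' d = 0 ∧ d * d ≤ m''
        · rw [if_pos hc, if_pos hc]
        · rw [if_neg hc, if_neg hc]
          exact hinv m'' hg1 hg2
      exact ih (d + 1) _ (by omega) (by omega) (by rw [inner_len]; exact hlen) hnew m' h1 h2
    · rw [if_neg hlt]
      have hsm : pvIsqrt m' ≤ d - 1 := by
        by_contra hcon
        have hdle : d ≤ pvIsqrt m' := by omega
        have := pvIsqrt_sq_le m' d (by omega) (by omega) hdle
        omega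
      rw [hinv m' h1 h2, refAux_stable m' (d - 1) (by omega) hsm]

lemma walk_eq (lo limit : Int) (best : List Int)
    (hchar : ∀ m, lo ≤ m → m < limit → PySem.List.pyGetD best (m - lo) 0 = refAux m (pvIsqrt m)) :
    ∀ (ms : List Int), (∀ m ∈ ms, 4 ≤ m ∧ lo ≤ m ∧ m < limit) → ∀ dif vx v1 v2,
      gpLoop (ms.filter is_composite) dif vx v1 v2 = walkLoop lo best ms dif (vx, v1, v2) := by
  intro ms
  induction ms with
  | nil => intro _ dif vx v1 v2; rfl
  | cons m rest ih =>
    intro hms dif vx v1 v2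
    obtain ⟨hm4, hmlo, hmlim⟩ := hms m (by simp)
    have hrest : ∀ a ∈ rest, 4 ≤ a ∧ lo ≤ a ∧ a < limit := fun a ha => hms a (by simp [ha])
    have hs0 : (0:Int) ≤ pvIsqrt m := by unfold pvIsqrt; positivity
    obtain ⟨k, hk⟩ : ∃ k : Nat, (k : Int) = pvIsqrt m := ⟨(pvIsqrt m).toNat, by omega⟩
    have hget := hchar m hmlo hmlim
    rw [walkLoop, List.filter_cons]
    rw [is_composite_eq m hm4]
    rcases refAux_pos_spec m k with hz | ⟨hg2, hgmod, hgsq⟩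
    · rw [hk] at hz
      rw [hz]
      norm_num
      rw [hget, hz]
      norm_num
      exact ih hrest dif vx v1 v2
    · rw [hk] at hg2 hgmod hgsq
      set g := refAux m (pvIsqrt m) with hg
      have hgz : g ≠ 0 := by omega
      have hbne : (g != 0) = true := by simpa using hgz
      rw [hbne]
      simp only [if_true]
      rw [gpLoop]
      have hgdp : greatest_divisor_pair m = (g, PySem.Int.floordiv m g) := by
        unfold greatest_divisor_pair
        have hkn : (pvIsqrt m).toNat = k := by omega
        rw [hkn, gdp_eq m (by omega) k (le_of_eq hk), hk, ← hg, if_neg hgz]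
      rw [hgdp]
      have hd12 : g ≤ PySem.Int.floordiv m g :=
        (PySem.Int.le_floordiv_iff_mul_le (by omega)).mpr hgsq
      have habs2 : |g - PySem.Int.floordiv m g| = PySem.Int.floordiv m g - g := by
        rw [abs_sub_comm, abs_of_nonneg (by omega)]
      rw [hget]
      show (if |g - PySem.Int.floordiv m g| > dif then some (vx, v1, v2)
          else gpLoop (List.filter is_composite rest) |g - PySem.Int.floordiv m g| m g
            (PySem.Int.floordiv m g)) =
        if (g == 0) = true then walkLoop lo best rest dif (vx, v1, v2)
        else
          if PySem.Int.floordiv m g - g > dif then some (vx, v1, v2)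
          else walkLoop lo best rest (PySem.Int.floordiv m g - g) (m, g, PySem.Int.floordiv m g)
      rw [habs2, if_neg (show ¬ ((g == 0) = true) by simp [hgz])]
      by_cases hcmp : PySem.Int.floordiv m g - g > dif
      · rw [if_pos hcmp, if_pos hcmp]
      · rw [if_neg hcmp, if_neg hcmp]
        exact ih hrest _ _ _ _

lemma filter_small_nil (a b : Int) (hb : b ≤ 4) :
    (PySem.List.pyRange a b 1).filter is_composite = [] := by
  rw [List.filter_eq_nil_iff]
  intro m hm
  have := (PySem.List.mem_pyRange_one).mp hm
  unfold is_composite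
  rw [if_pos (by omega)]
  simp


-- ===== VERDICT (by name: the statement is the Claim_ definition above) =====
theorem get_padding_and_dim_spec : Claim_equal_get_padding_and_dim := by
  intro x _
  unfold Spec_get_padding_and_dim get_padding_and_dim get_padding_and_dim_alt
    find_nearest_composites
  set limit := PySem.Int.truncdiv (x * 3) 2 with hlim
  set lo := if x > 4 then x else 4 with hlo
  have hlo4 : 4 ≤ lo := by rw [hlo]; split_ifs <;> omega
  by_cases hle : limit ≤ lo
  · rw [if_pos hle]
    by_cases hx : x > 4
    · rw [PySem.List.pyRange_one_eq_nil (by rw [hlo, if_pos hx] at hle; omega)]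
      rfl
    · have hl4 : limit ≤ 4 := by rw [hlo, if_neg hx] at hle; omega
      rw [filter_small_nil x limit hl4]
      rfl
  · rw [if_neg hle]
    have hlt : lo < limit := by omega
    have hchar : ∀ m, lo ≤ m → m < limit →
        PySem.List.pyGetD (sieveLoop limit lo (List.replicate (limit - lo).toNat 0) 2
            (limit - 2).toNat) (m - lo) 0
          = refAux m (pvIsqrt m) := by
      intro m h1 h2
      refine sieve_char limit lo (by omega) (limit - 2).toNat 2 _ rfl (by omega)
        (by simp) ?_ m h1 h2
      intro m' h1' h2'
      rw [refAux_le_one m' (2 - 1) (by omega)]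
      rw [PySem.List.pyGetD_eq_getElem _ 0 (by omega) (by simp; omega)]
      simp
    have hfil : (PySem.List.pyRange x limit 1).filter is_composite
        = (PySem.List.pyRange lo limit 1).filter is_composite := by
      by_cases hx : x > 4
      · rw [hlo, if_pos hx]
      · rw [hlo, if_neg hx] at *
        rw [PySem.List.pyRange_one_append x 4 limit (by omega) (by omega), List.filter_append,
          filter_small_nil x 4 (by omega)]
        rfl
    rw [hfil]
    exact walk_eq lo limit _ hchar (PySem.List.pyRange lo limit 1)
      (fun m hm => by
        have := (PySem.List.mem_pyRange_one).mp hm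
        exact ⟨by omega, by omega, by omega⟩) x x 0 0
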